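-- pv_equiv track=rewrite | github.com/yjsayya/Algorithms | 1. Programmers/대회/PCCP_모의고사_1/3.유전법칙.py | get_gene
-- ===== SOURCE A (Python) =====
-- def get_gene(n,p):
--     stack = []
--
--     p -= 1
--     while n > 1:
--         stack.append(p%4)
--         n -= 1
--         p //= 4
--
--     while stack:
--         num = stack.pop()
--         if num == 0:
--             return 'RR'
--         elif num == 3:
--             return 'rr'
--         else:
--             return 'Rr'
-- ===== SOURCE B (Python) =====
-- def get_gene(n, p):
--     if n <= 1:
--         return None
--     d = ((p - 1) // 4 ** (n - 2)) % 4
--     return 'RR' if d == 0 else 'rr' if d == 3 else 'Rr'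
-- ===== Notes on version B (the rewrite author's own statement) =====
-- stated objective: faster
-- what changed: Replaces the O(n) digit-pushing loop (which only ever uses its last pushed digit) by a closed-form computation of that top base-4 digit, ((p-1) // 4**(n-2)) % 4, via exponentiation.
import Mathlib
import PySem

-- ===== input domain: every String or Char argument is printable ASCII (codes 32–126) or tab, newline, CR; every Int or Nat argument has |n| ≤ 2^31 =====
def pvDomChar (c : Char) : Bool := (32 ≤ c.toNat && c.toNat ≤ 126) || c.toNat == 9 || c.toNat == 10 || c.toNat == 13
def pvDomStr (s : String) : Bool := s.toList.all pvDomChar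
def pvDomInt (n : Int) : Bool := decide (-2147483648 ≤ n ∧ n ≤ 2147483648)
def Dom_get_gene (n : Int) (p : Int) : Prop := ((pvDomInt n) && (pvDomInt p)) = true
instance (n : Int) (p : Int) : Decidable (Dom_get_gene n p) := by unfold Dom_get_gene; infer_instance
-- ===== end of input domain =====

-- B replaces A's O(n) digit-pushing loop (which only uses the last pushed digit) by the
-- closed form ((p-1) // 4^(n-2)) % 4; equivalence of return values is proved for all ints.


-- ===== PORT A =====
-- first while loop: push p%4, n -= 1, p //= 4
def pvBuildStack (n p : Int) (stack : List Int) : List Int :=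
  if 1 < n then
    pvBuildStack (n - 1) (PySem.Int.floordiv p 4) (stack ++ [PySem.Int.mod p 4])
  else stack
termination_by n.toNat
decreasing_by omega

-- second while loop: every branch returns, so it runs at most one iteration;
-- stack.pop() takes the LAST element (getLast?); empty stack → falls off the end → None
def pvPopLoop (stack : List Int) : Option String :=
  match stack.getLast? with
  | none => none
  | some num =>
    if num = 0 then some "RR"
    else if num = 3 then some "rr"
    else some "Rr"

def get_gene (n : Int) (p : Int) : Option String :=
  pvPopLoop (pvBuildStack n (p - 1) [])

-- ===== PORT B =====
def get_gene_alt (n : Int) (p : Int) : Option String :=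
  if n ≤ 1 then none
  else
    let d := PySem.Int.mod (PySem.Int.floordiv (p - 1) ((4 : Int) ^ (n - 2).toNat)) 4
    if d = 0 then some "RR" else if d = 3 then some "rr" else some "Rr"

-- ===== PRECONDITION & SPEC =====
def Spec_get_gene (n : Int) (p : Int) (out : Option String) : Prop := out = get_gene_alt n p
instance (n : Int) (p : Int) (out : Option String) : Decidable (Spec_get_gene n p out) := by unfold Spec_get_gene; infer_instance

-- ===== CLAIM (what is proved, stated in full; the proofs are below) =====
def Claim_equal_get_gene : Prop := ∀ (n : Int) (p : Int), Dom_get_gene n p → Spec_get_gene n p (get_gene n p)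

-- ===== LEMMAS AND PROOFS =====

-- the last element pushed by the loop is the top base-4 digit of p
theorem pvBuildStack_getLast (k : Nat) : ∀ (p : Int) (stack : List Int),
    (pvBuildStack ((k : Int) + 2) p stack).getLast?
      = some (PySem.Int.mod (PySem.Int.floordiv p ((4 : Int) ^ k)) 4) := by
  induction k with
  | zero =>
    intro p stack
    rw [pvBuildStack, if_pos (by omega)]
    rw [pvBuildStack, if_neg (by omega)]
    simp
  | succ k ih =>
    intro p stack
    rw [pvBuildStack, if_pos (by push_cast; omega)]
    rw [show (((k : Nat) + 1 : Nat) : Int) + 2 - 1 = (k : Int) + 2 by push_cast; omega]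
    rw [ih]
    congr 1
    rw [PySem.Int.floordiv_eq_ediv_of_pos (by norm_num),
        PySem.Int.floordiv_eq_ediv_of_pos (by positivity),
        PySem.Int.floordiv_eq_ediv_of_pos (by positivity)]
    rw [Int.ediv_ediv_of_nonneg]
    · congr 1; ring_nf
    · norm_num

theorem pvBuildStack_base (n p : Int) (h : n ≤ 1) (stack : List Int) :
    pvBuildStack n p stack = stack := by
  rw [pvBuildStack, if_neg (by omega)]

-- ===== VERDICT (by name: the statement is the Claim_ definition above) =====
theorem get_gene_spec : Claim_equal_get_gene := by
  intro n p _
  unfold Spec_get_gene get_gene get_gene_alt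
  by_cases h : n ≤ 1
  · rw [pvBuildStack_base n (p - 1) h, if_pos h]
    rfl
  · rw [if_neg h]
    have hk : n = ((n - 2).toNat : Int) + 2 := by omega
    rw [hk]
    rw [show ((((n - 2).toNat : Int) + 2 - 2)).toNat = (n - 2).toNat by omega]
    unfold pvPopLoop
    rw [pvBuildStack_getLast]
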